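-- pv_equiv track=rewrite | github.com/GabrielRodolfoR/Estrutura-de-Dados | Recursao/main.py | contagem_digitos_numeros
-- ===== SOURCE A (Python) =====
-- def contagem_digitos_numeros(lista):
--     if not lista:
--         return []
--     n = lista[0]
--
--     def contar_digitos(n):
--         if n < 10:
--             return 1
--         else:
--             return 1 + contar_digitos(n // 10)
--
--     return [contar_digitos(n)] + contagem_digitos_numeros(lista[1:])
-- ===== SOURCE B (Python) =====
-- def contagem_digitos_numeros(lista):
--     resultado = []
--     for n in lista:
--         c = 1
--         while n >= 10:
--             n //= 10
--             c += 1
--         resultado.append(c)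
--     return resultado
-- ===== Notes on version B (the rewrite author's own statement) =====
-- stated objective: simpler
-- what changed: Replaces the double recursion (on the list via slicing and on each number) with a single for-loop appending to an accumulator and an iterative while-loop digit counter.
import Mathlib
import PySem

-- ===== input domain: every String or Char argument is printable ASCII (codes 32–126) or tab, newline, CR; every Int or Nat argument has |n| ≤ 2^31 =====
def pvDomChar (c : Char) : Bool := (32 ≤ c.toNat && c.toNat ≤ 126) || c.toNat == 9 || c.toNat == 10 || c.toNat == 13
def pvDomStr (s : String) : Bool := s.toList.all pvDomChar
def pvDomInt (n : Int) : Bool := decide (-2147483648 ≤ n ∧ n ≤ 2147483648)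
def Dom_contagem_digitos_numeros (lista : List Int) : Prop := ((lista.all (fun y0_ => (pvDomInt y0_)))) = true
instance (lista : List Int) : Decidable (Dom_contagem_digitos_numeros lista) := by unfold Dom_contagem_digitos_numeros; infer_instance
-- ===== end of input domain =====

-- B changes the decomposition only (recursion + slicing → for-loop with while-loop counter); return value proved identical.
-- ===== PORT A =====
-- inner helper `contar_digitos`: recursive, 1 for n < 10 else 1 + recurse on n // 10
def contarDigitos (n : Int) : Int :=
  if n < 10 then 1
  else 1 + contarDigitos (PySem.Int.floordiv n 10)
termination_by n.toNat
decreasing_by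
  rw [PySem.Int.floordiv_eq_ediv_of_pos (by omega)]
  omega

def contagem_digitos_numeros (lista : List Int) : List Int :=
  match lista with
  | [] => []
  | n :: rest => contarDigitos n :: contagem_digitos_numeros rest

-- ===== PORT B =====
-- iterative digit counter: c = 1; while n >= 10: n //= 10; c += 1
def contaLoop (n c : Int) : Int :=
  if n ≥ 10 then contaLoop (PySem.Int.floordiv n 10) (c + 1)
  else c
termination_by n.toNat
decreasing_by
  rw [PySem.Int.floordiv_eq_ediv_of_pos (by omega)]
  omega

def contagem_digitos_numeros_alt (lista : List Int) : List Int :=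
  lista.foldl (fun resultado n => resultado ++ [contaLoop n 1]) []

-- ===== PRECONDITION & SPEC =====
def Spec_contagem_digitos_numeros (lista : List Int) (out : List Int) : Prop := out = contagem_digitos_numeros_alt lista
instance (lista : List Int) (out : List Int) : Decidable (Spec_contagem_digitos_numeros lista out) := by unfold Spec_contagem_digitos_numeros; infer_instance

-- ===== CLAIM (what is proved, stated in full; the proofs are below) =====
def Claim_equal_contagem_digitos_numeros : Prop := ∀ (lista : List Int), Dom_contagem_digitos_numeros lista → Spec_contagem_digitos_numeros lista (contagem_digitos_numeros lista)

-- ===== LEMMAS AND PROOFS =====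
-- the while-loop accumulator adds c - 1 to the recursive count
theorem contaLoop_eq (n c : Int) : contaLoop n c = contarDigitos n + (c - 1) := by
  induction n, c using contaLoop.induct with
  | case1 n c h ih =>
      rw [contaLoop, contarDigitos, if_pos h, if_neg (by omega), ih]
      omega
  | case2 n c h =>
      rw [contaLoop, contarDigitos, if_neg h, if_pos (by omega)]
      omega

theorem alt_eq_map (lista : List Int) :
    contagem_digitos_numeros_alt lista = lista.map contarDigitos := by
  unfold contagem_digitos_numeros_alt
  rw [PySem.List.foldl_append_singleton_eq_map]
  refine List.map_congr_left (fun n _ => ?_)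
  rw [contaLoop_eq]; omega

theorem a_eq_map (lista : List Int) :
    contagem_digitos_numeros lista = lista.map contarDigitos := by
  induction lista with
  | nil => rfl
  | cons n rest ih => simp [contagem_digitos_numeros, ih]

-- ===== VERDICT (by name: the statement is the Claim_ definition above) =====
theorem contagem_digitos_numeros_spec : Claim_equal_contagem_digitos_numeros := by
  intro lista _
  unfold Spec_contagem_digitos_numeros
  rw [alt_eq_map, a_eq_map]
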